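-- pv_equiv track=rewrite | github.com/Gutiotomas/Analysis-Design-Algorithms | Module_10/Problem_E/stacking_bivalves.py | towers
-- ===== SOURCE A (Python) =====
-- from bisect import bisect_right
--
-- def towers(rad):
--     stacks = []
--
--     for radius in rad:
--         pos = bisect_right(stacks, radius)
--
--         if pos < len(stacks):
--             stacks[pos] = radius
--         else:
--             stacks.append(radius)
--
--     return len(stacks)
-- ===== SOURCE B (Python) =====
-- def towers(rad):
--     # O(n^2) DP: dp holds (radius, longest non-decreasing run ending there)
--     dp = []
--     for x in rad:
--         best = 0
--         for (y, l) in dp: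
--             if y <= x and l > best:
--                 best = l
--         dp.append((x, best + 1))
--     return max((l for _, l in dp), default=0)
-- ===== Notes on version B (the rewrite author's own statement) =====
-- stated objective: alternative
-- what changed: Replaced the patience-sorting pile array maintained with bisect_right by a quadratic dynamic program that computes, for each element, the longest non-decreasing subsequence ending there and returns the maximum.
import Mathlib
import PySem

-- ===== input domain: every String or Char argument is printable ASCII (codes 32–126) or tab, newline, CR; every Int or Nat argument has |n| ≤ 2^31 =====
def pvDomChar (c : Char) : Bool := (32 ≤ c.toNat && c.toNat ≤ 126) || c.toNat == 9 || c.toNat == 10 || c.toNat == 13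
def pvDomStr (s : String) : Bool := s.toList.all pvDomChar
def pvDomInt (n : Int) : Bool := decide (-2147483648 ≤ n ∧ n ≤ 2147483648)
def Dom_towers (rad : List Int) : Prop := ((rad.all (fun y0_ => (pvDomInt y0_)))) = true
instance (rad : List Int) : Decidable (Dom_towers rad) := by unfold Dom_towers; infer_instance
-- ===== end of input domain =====

-- B replaces A's patience-sorting piles (bisect_right) by an O(n^2) longest-non-decreasing-subsequence DP; objective: alternative algorithm, not faster.

-- ===== PORT A =====
-- bisect.bisect_right on a sorted int list: index of the first element > r
-- (exact contract of the stdlib call, computed by a scan).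
def pvBisectRight (s : List Int) (r : Int) : Nat :=
  match s with
  | [] => 0
  | x :: xs => if r < x then 0 else pvBisectRight xs r + 1

def pvStepA (s : List Int) (r : Int) : List Int :=
  let pos := pvBisectRight s r
  if pos < s.length then s.set pos r else s ++ [r]

def towers (rad : List Int) : Int :=
  ((rad.foldl pvStepA []).length : Int)

-- ===== PORT B =====
-- best l x = the inner loop of Source B: max dp value among pairs with radius ≤ x (0 if none)
def pvBest (d : List (Int × Nat)) (x : Int) : Nat :=
  d.foldl (fun b p => if p.1 ≤ x ∧ b < p.2 then p.2 else b) 0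

def pvStepB (d : List (Int × Nat)) (x : Int) : List (Int × Nat) :=
  d ++ [(x, pvBest d x + 1)]

def pvMaxLen (d : List (Int × Nat)) : Nat :=
  d.foldl (fun m p => max m p.2) 0

def towers_alt (rad : List Int) : Int :=
  ((pvMaxLen (rad.foldl pvStepB [])) : Int)

-- ===== PRECONDITION & SPEC =====
def Spec_towers (rad : List Int) (out : Int) : Prop := out = towers_alt rad
instance (rad : List Int) (out : Int) : Decidable (Spec_towers rad out) := by unfold Spec_towers; infer_instance

-- ===== CLAIM (what is proved, stated in full; the proofs are below) =====
def Claim_equal_towers : Prop := ∀ (rad : List Int), Dom_towers rad → Spec_towers rad (towers rad)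

-- ===== LEMMAS AND PROOFS =====

-- count of elements ≤ t
def pvCnt (s : List Int) (t : Int) : Nat := s.countP (fun a => decide (a ≤ t))

-- the invariant linking A's piles to B's dp table
def pvInv (s : List Int) (d : List (Int × Nat)) : Prop :=
  s.Pairwise (· ≤ ·) ∧ (∀ t, pvCnt s t = pvBest d t) ∧ s.length = pvMaxLen d

-- recursive characterisation of A's step
theorem pvStepA_nil (r : Int) : pvStepA [] r = [r] := by simp [pvStepA, pvBisectRight]

theorem pvStepA_cons_lt (x : Int) (xs : List Int) (r : Int) (h : r < x) :
    pvStepA (x :: xs) r = r :: xs := by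
  simp [pvStepA, pvBisectRight, h]

theorem pvStepA_cons_ge (x : Int) (xs : List Int) (r : Int) (h : ¬ r < x) :
    pvStepA (x :: xs) r = x :: pvStepA xs r := by
  simp only [pvStepA, pvBisectRight, if_neg h, List.length_cons]
  by_cases hlt : pvBisectRight xs r < xs.length
  · rw [if_pos (by omega), if_pos hlt]
    rfl
  · rw [if_neg (by omega), if_neg hlt]
    simp

theorem pvStepA_mem (s : List Int) (r a : Int) (h : a ∈ pvStepA s r) : a = r ∨ a ∈ s := by
  induction s with
  | nil => simp [pvStepA_nil] at h; tauto
  | cons x xs ih =>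
    by_cases hr : r < x
    · rw [pvStepA_cons_lt x xs r hr] at h
      simp at h; rcases h with h | h <;> simp [h]
    · rw [pvStepA_cons_ge x xs r hr] at h
      simp at h
      rcases h with h | h
      · simp [h]
      · rcases ih h with h' | h' <;> simp [h']

theorem pvStepA_sorted (s : List Int) (r : Int) (h : s.Pairwise (· ≤ ·)) :
    (pvStepA s r).Pairwise (· ≤ ·) := by
  induction s with
  | nil => simp [pvStepA_nil]
  | cons x xs ih =>
    rcases List.pairwise_cons.mp h with ⟨hx, hxs⟩
    by_cases hr : r < x
    · rw [pvStepA_cons_lt x xs r hr]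
      exact List.pairwise_cons.mpr ⟨fun y hy => le_of_lt (lt_of_lt_of_le hr (hx y hy)), hxs⟩
    · rw [pvStepA_cons_ge x xs r hr]
      refine List.pairwise_cons.mpr ⟨fun y hy => ?_, ih hxs⟩
      rcases pvStepA_mem xs r y hy with h' | h'
      · omega
      · exact hx y h'

theorem pvCnt_nil (t : Int) : pvCnt [] t = 0 := rfl

theorem pvCnt_cons (a : Int) (s : List Int) (t : Int) :
    pvCnt (a :: s) t = pvCnt s t + (if a ≤ t then 1 else 0) := by
  simp [pvCnt, List.countP_cons]

theorem pvCnt_eq_zero (s : List Int) (x t : Int) (hs : (x :: s).Pairwise (· ≤ ·)) (h : t < x) :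
    pvCnt s t = 0 := by
  rcases List.pairwise_cons.mp hs with ⟨hx, _⟩
  simp only [pvCnt, List.countP_eq_zero]
  intro a ha
  have := hx a ha
  simp; omega

-- count after A's step
theorem pvStepA_cnt (s : List Int) (r t : Int) (h : s.Pairwise (· ≤ ·)) :
    pvCnt (pvStepA s r) t =
      if r ≤ t then max (pvCnt s t) (pvCnt s r + 1) else pvCnt s t := by
  induction s with
  | nil =>
    rw [pvStepA_nil]
    simp only [pvCnt_cons, pvCnt_nil]
    split <;> simp
  | cons x xs ih =>
    rcases List.pairwise_cons.mp h with ⟨_, hxs⟩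
    by_cases hr : r < x
    · rw [pvStepA_cons_lt x xs r hr]
      have hcr : pvCnt xs r = 0 := pvCnt_eq_zero xs x r h hr
      rw [pvCnt_cons r xs t, pvCnt_cons x xs t, pvCnt_cons x xs r]
      by_cases hxt : x ≤ t
      · split_ifs <;> omega
      · have hcx : pvCnt xs t = 0 := pvCnt_eq_zero xs x t h (by omega)
        split_ifs <;> omega
    · rw [pvStepA_cons_ge x xs r hr, pvCnt_cons, ih hxs, pvCnt_cons x xs t, pvCnt_cons x xs r]
      split_ifs <;> omega

-- length after A's step
theorem pvStepA_length (s : List Int) (r : Int) (h : s.Pairwise (· ≤ ·)) :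
    (pvStepA s r).length = max s.length (pvCnt s r + 1) := by
  induction s with
  | nil => simp [pvStepA_nil, pvCnt_nil]
  | cons x xs ih =>
    rcases List.pairwise_cons.mp h with ⟨_, hxs⟩
    by_cases hr : r < x
    · rw [pvStepA_cons_lt x xs r hr]
      have hcr : pvCnt xs r = 0 := pvCnt_eq_zero xs x r h hr
      rw [pvCnt_cons]
      simp only [List.length_cons]
      rw [if_neg (by omega)]
      omega
    · rw [pvStepA_cons_ge x xs r hr]
      simp only [List.length_cons]
      rw [ih hxs, pvCnt_cons, if_pos (by omega : x ≤ r)]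
      omega

-- B's fold steps
theorem pvBest_append (d : List (Int × Nat)) (r : Int) (v : Nat) (t : Int) :
    pvBest (d ++ [(r, v)]) t = if r ≤ t then max (pvBest d t) v else pvBest d t := by
  simp only [pvBest, List.foldl_append, List.foldl_cons, List.foldl_nil]
  split_ifs with h1 h2 h3 <;> simp_all; omega

theorem pvMaxLen_append (d : List (Int × Nat)) (r : Int) (v : Nat) :
    pvMaxLen (d ++ [(r, v)]) = max (pvMaxLen d) v := by
  simp [pvMaxLen, List.foldl_append]

-- the invariant is preserved
theorem pvInv_step (s : List Int) (d : List (Int × Nat)) (r : Int) (h : pvInv s d) :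
    pvInv (pvStepA s r) (pvStepB d r) := by
  rcases h with ⟨hsort, hcnt, hlen⟩
  refine ⟨pvStepA_sorted s r hsort, ?_, ?_⟩
  · intro t
    rw [pvStepA_cnt s r t hsort, hcnt t, hcnt r, pvStepB, pvBest_append]
  · rw [pvStepA_length s r hsort, hcnt r, hlen, pvStepB, pvMaxLen_append]

theorem pvMain (rad : List Int) (s : List Int) (d : List (Int × Nat)) (h : pvInv s d) :
    (rad.foldl pvStepA s).length = pvMaxLen (rad.foldl pvStepB d) := by
  induction rad generalizing s d with
  | nil => exact h.2.2
  | cons r rs ih => exact ih (pvStepA s r) (pvStepB d r) (pvInv_step s d r h)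

theorem pvInv_nil : pvInv [] [] :=
  ⟨List.Pairwise.nil, fun _ => rfl, rfl⟩

-- ===== VERDICT (by name: the statement is the Claim_ definition above) =====
theorem towers_spec : Claim_equal_towers := by
  intro rad _
  unfold Spec_towers towers towers_alt
  exact_mod_cast pvMain rad [] [] pvInv_nil
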